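-- pv_equiv track=rewrite | github.com/sylvainPanneau/petitsBeaux | css_parse/parse.py | words_not_in_pages
-- ===== SOURCE A (Python) =====
-- def words_not_in_pages(tab, p1, p2, p3, p4, p5):
--     t = []
--     i = 0
--     while i < len(tab):
--         x = "<"+tab[i]
--         if x not in p1 and x not in p2 and x not in p3 and x not in p4 and x not in p5:
--             t.append(tab[i])
--         i+=1
--     return t
-- ===== SOURCE B (Python) =====
-- def words_not_in_pages(tab, p1, p2, p3, p4, p5):
--     # Index the pages once: collect the suffix after every '<' occurrence,
--     # then a word is excluded iff some such suffix starts with it.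
--     starts = []
--     for p in (p1, p2, p3, p4, p5):
--         for i, c in enumerate(p):
--             if c == '<':
--                 starts.append(p[i + 1:])
--     return [w for w in tab if not any(s.startswith(w) for s in starts)]
-- ===== Notes on version B (the rewrite author's own statement) =====
-- stated objective: alternative
-- what changed: A runs a generic substring search of '<'+word over each of the five pages for every word; B instead builds once an index of the pages - the list of suffixes following each '<' character - and then decides each word by plain prefix tests ('<'+w occurs in a page iff w is a prefix of the suffix after some '<'), so no substring search is performed at all.
import Mathlib
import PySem

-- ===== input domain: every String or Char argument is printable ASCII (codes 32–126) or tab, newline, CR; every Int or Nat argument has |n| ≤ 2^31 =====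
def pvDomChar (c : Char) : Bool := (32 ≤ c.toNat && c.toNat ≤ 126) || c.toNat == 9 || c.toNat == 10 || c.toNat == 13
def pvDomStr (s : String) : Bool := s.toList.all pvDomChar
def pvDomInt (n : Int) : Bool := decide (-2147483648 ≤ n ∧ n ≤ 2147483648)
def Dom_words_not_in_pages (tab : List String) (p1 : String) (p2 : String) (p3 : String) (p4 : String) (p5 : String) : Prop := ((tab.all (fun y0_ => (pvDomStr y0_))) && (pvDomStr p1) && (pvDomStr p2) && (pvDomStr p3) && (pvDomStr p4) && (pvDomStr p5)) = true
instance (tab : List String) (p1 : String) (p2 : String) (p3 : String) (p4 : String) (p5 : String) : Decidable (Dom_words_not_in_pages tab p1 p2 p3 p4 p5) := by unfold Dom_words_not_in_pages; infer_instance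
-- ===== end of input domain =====

-- B replaces per-word substring searches by an index of the pages (the suffix after each '<'),
-- deciding each word with plain prefix tests; objective: alternative algorithm, same cost class.

-- ===== PORT A =====
def words_not_in_pages (tab : List String) (p1 : String) (p2 : String) (p3 : String) (p4 : String) (p5 : String) : List String :=
  tab.foldl (fun t w =>
    let x : List Char := '<' :: w.toList
    if (!PySem.Chars.isIn x p1.toList && !PySem.Chars.isIn x p2.toList &&
        !PySem.Chars.isIn x p3.toList && !PySem.Chars.isIn x p4.toList &&
        !PySem.Chars.isIn x p5.toList) then t ++ [w] else t) []

-- ===== PORT B =====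
-- inner loop of Source B: for each position i with p[i] = '<', append p[i+1:] (in order)
def ltSuffixes : List Char → List (List Char)
  | [] => []
  | c :: rest => if c = '<' then rest :: ltSuffixes rest else ltSuffixes rest

def words_not_in_pages_alt (tab : List String) (p1 : String) (p2 : String) (p3 : String) (p4 : String) (p5 : String) : List String :=
  let starts : List (List Char) :=
    ltSuffixes p1.toList ++ ltSuffixes p2.toList ++ ltSuffixes p3.toList ++
    ltSuffixes p4.toList ++ ltSuffixes p5.toList
  tab.filter (fun w => !(starts.any (fun s => PySem.Chars.startswith s w.toList)))

-- ===== PRECONDITION & SPEC =====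
def Spec_words_not_in_pages (tab : List String) (p1 : String) (p2 : String) (p3 : String) (p4 : String) (p5 : String) (out : List String) : Prop := out = words_not_in_pages_alt tab p1 p2 p3 p4 p5
instance (tab : List String) (p1 : String) (p2 : String) (p3 : String) (p4 : String) (p5 : String) (out : List String) : Decidable (Spec_words_not_in_pages tab p1 p2 p3 p4 p5 out) := by unfold Spec_words_not_in_pages; infer_instance

-- ===== CLAIM (what is proved, stated in full; the proofs are below) =====
def Claim_equal_words_not_in_pages : Prop := ∀ (tab : List String) (p1 : String) (p2 : String) (p3 : String) (p4 : String) (p5 : String), Dom_words_not_in_pages tab p1 p2 p3 p4 p5 → Spec_words_not_in_pages tab p1 p2 p3 p4 p5 (words_not_in_pages tab p1 p2 p3 p4 p5)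

-- ===== LEMMAS AND PROOFS =====

-- '<'+w occurs in p iff w is a prefix of the suffix after some '<' in p.
lemma infix_lt_iff (w p : List Char) :
    ('<' :: w) <:+: p ↔ ∃ s ∈ ltSuffixes p, w <+: s := by
  induction p with
  | nil => simp [ltSuffixes]
  | cons c rest ih =>
    rw [List.infix_cons_iff, ih]
    by_cases hc : c = '<'
    · subst hc
      simp [ltSuffixes, List.cons_prefix_cons]
    · simp [ltSuffixes, hc, List.cons_prefix_cons, Ne.symm hc]

lemma isIn_lt_eq_any (w p : List Char) :
    PySem.Chars.isIn ('<' :: w) p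
      = (ltSuffixes p).any (fun s => PySem.Chars.startswith s w) := by
  rw [Bool.eq_iff_iff]
  simp [PySem.Chars.isIn_iff_infix, List.any_eq_true, PySem.Chars.startswith_iff,
    infix_lt_iff]

-- ===== VERDICT (by name: the statement is the Claim_ definition above) =====
theorem words_not_in_pages_spec : Claim_equal_words_not_in_pages := by
  intro tab p1 p2 p3 p4 p5 _
  unfold Spec_words_not_in_pages words_not_in_pages words_not_in_pages_alt
  rw [PySem.List.foldl_append_if_eq_filter, List.nil_append]
  refine List.filter_congr ?_
  intro w _
  simp only [isIn_lt_eq_any, List.any_append, Bool.not_or, Bool.and_assoc]
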